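-- pv_equiv track=rewrite | github.com/michaelkrisnadi/Projects | dataDrivenPerformanceAnalysis/AIT2109821_Experiment-2.py | group_intakes
-- ===== SOURCE A (Python) =====
-- def group_intakes(all_students_new):
--     intakes = {}
--     for id, name in all_students_new.items():
--         intake = id[3:7]
--         if intake in intakes:
--             intakes[intake].append(id)
--         else:
--             intakes[intake] = [id]
--     intakes = dict(sorted(intakes.items()))
--     return intakes
-- ===== SOURCE B (Python) =====
-- def group_intakes(all_students_new):
--     items = list(all_students_new.items())
--     keys = sorted({id[3:7] for id, _ in items})
--     return {k: [id for id, _ in items if id[3:7] == k] for k in keys}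
-- ===== Notes on version B (the rewrite author's own statement) =====
-- stated objective: simpler
-- what changed: B replaces the build-a-dict-in-insertion-order-then-sort pass by computing the sorted set of intake keys first and building the result directly in sorted order with one filtering comprehension per key.
import Mathlib
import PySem

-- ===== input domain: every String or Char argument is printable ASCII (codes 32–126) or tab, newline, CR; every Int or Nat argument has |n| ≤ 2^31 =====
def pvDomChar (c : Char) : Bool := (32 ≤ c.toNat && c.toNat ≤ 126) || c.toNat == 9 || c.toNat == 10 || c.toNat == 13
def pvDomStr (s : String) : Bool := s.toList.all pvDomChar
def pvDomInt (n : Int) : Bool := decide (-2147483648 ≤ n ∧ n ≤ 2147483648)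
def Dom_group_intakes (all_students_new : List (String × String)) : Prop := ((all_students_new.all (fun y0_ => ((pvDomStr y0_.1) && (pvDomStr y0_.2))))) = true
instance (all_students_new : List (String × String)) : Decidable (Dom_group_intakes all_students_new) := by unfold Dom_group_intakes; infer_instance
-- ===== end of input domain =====

-- B builds the result directly in sorted key order (sorted set of intake keys, one filter per key)
-- instead of A's grouping dict in insertion order followed by a sort of its items; objective: simpler.

-- id[3:7] — shared by both ports
def pvIntake (s : String) : String := String.ofList (PySem.List.slice s.toList (some 3) (some 7))

-- ===== PORT A =====
-- the final 'dict(sorted(intakes.items()))' compares tuples, but the dict's keys are distinct,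
-- so Python's tuple comparison never reaches the second component: sorting by the key alone is exact
def group_intakes (all_students_new : List (String × String)) : List (String × List String) :=
  let intakes : PySem.Dict String (List String) :=
    all_students_new.foldl
      (fun d p =>
        let intake := pvIntake p.1
        if d.contains intake then d.modify intake [] (fun l => l ++ [p.1])
        else d.insert intake [p.1])
      PySem.Dict.empty
  PySem.List.sorted intakes.items (fun q => q.1) false

-- ===== PORT B =====
def group_intakes_alt (all_students_new : List (String × String)) : List (String × List String) :=
  let keys : List String :=
    PySem.List.sorted (PySem.Set.ofList (all_students_new.map (fun p => pvIntake p.1))) (fun k => k) false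
  keys.map (fun k => (k, (all_students_new.filter (fun p => pvIntake p.1 == k)).map (fun p => p.1)))

-- ===== PRECONDITION & SPEC =====
def Spec_group_intakes (all_students_new : List (String × String)) (out : List (String × List String)) : Prop := out = group_intakes_alt all_students_new
instance (all_students_new : List (String × String)) (out : List (String × List String)) : Decidable (Spec_group_intakes all_students_new out) := by unfold Spec_group_intakes; infer_instance

-- ===== CLAIM (what is proved, stated in full; the proofs are below) =====
def Claim_equal_group_intakes : Prop := ∀ (all_students_new : List (String × String)), Dom_group_intakes all_students_new → Spec_group_intakes all_students_new (group_intakes all_students_new)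

-- ===== LEMMAS AND PROOFS =====

-- A's loop body is an unconditional 'intakes[k] = intakes.get(k, []) + [id]'
theorem pv_step_eq_modify (d : PySem.Dict String (List String)) (p : String × String) :
    (let intake := pvIntake p.1
     if d.contains intake then d.modify intake [] (fun l => l ++ [p.1])
     else d.insert intake [p.1]) = d.modify (pvIntake p.1) [] (fun l => l ++ [p.1]) := by
  by_cases h : d.contains (pvIntake p.1)
  · simp [h]
  · simp only [Bool.not_eq_true] at h
    simp [h, PySem.Dict.modify, PySem.Dict.getD_of_not_contains (h := h)]

-- A's dict, written as the canonical modify-fold over (key, id) pairs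
theorem pv_dict_eq (xs : List (String × String)) :
    xs.foldl
      (fun d p =>
        let intake := pvIntake p.1
        if d.contains intake then d.modify intake [] (fun l => l ++ [p.1])
        else d.insert intake [p.1])
      PySem.Dict.empty
    = (xs.map (fun p => (pvIntake p.1, p.1))).foldl
        (fun d q => d.modify q.1 [] (fun l => l ++ [q.2])) PySem.Dict.empty := by
  rw [List.foldl_map]
  apply PySem.List.foldl_congr_mem
  intro d p _
  exact pv_step_eq_modify d p

theorem pv_items_eq (xs : List (String × String)) :
    ((xs.map (fun p => (pvIntake p.1, p.1))).foldl
        (fun d q => d.modify q.1 [] (fun l => l ++ [q.2])) PySem.Dict.empty).items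
    = (PySem.Set.ofList (xs.map (fun p => pvIntake p.1))).map
        (fun k => (k, (xs.filter (fun p => pvIntake p.1 == k)).map (fun p => p.1))) := by
  set l := xs.map (fun p => (pvIntake p.1, p.1)) with hl
  have hnd : ((l.foldl (fun d q => d.modify q.1 [] (fun v => v ++ [q.2])) PySem.Dict.empty)).keys.Nodup := by
    exact PySem.Dict.nodup_keys_foldl_modify_key l (fun q => q.1) [] (fun d q v => v ++ [q.2])
      PySem.Dict.empty (by simp)
  rw [PySem.Dict.items_eq_map_keys _ hnd []]
  have hkeys : ((l.foldl (fun d q => d.modify q.1 [] (fun v => v ++ [q.2])) PySem.Dict.empty)).keys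
      = PySem.Set.ofList (xs.map (fun p => pvIntake p.1)) := by
    rw [PySem.Dict.keys_foldl_modify_key]
    simp [PySem.Set.update, PySem.Set.ofList_eq_foldl, hl, List.map_map, Function.comp_def]
  rw [hkeys]
  apply List.map_congr_left
  intro k _
  congr 1
  rw [PySem.Dict.getD_foldl_modify_append]
  simp [hl, List.filter_map, List.map_map, Function.comp_def, PySem.Dict.getD_empty]

-- ===== VERDICT (by name: the statement is the Claim_ definition above) =====
theorem group_intakes_spec : Claim_equal_group_intakes := by
  intro xs _
  unfold Spec_group_intakes group_intakes group_intakes_alt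
  simp only []
  rw [pv_dict_eq, pv_items_eq]
  set K := PySem.Set.ofList (xs.map (fun p => pvIntake p.1)) with hK
  set g := (fun k => (k, (xs.filter (fun p => pvIntake p.1 == k)).map (fun p => p.1))) with hg
  apply PySem.List.sorted_eq_of_perm_of_pairwise_lt
  · exact (PySem.List.sorted_perm K (fun k => k) false).map g
  · have h := PySem.List.sorted_ofList_pairwise_lt (xs := xs.map (fun p => pvIntake p.1))
    rw [← hK] at h
    rw [List.pairwise_map]
    exact h.imp (fun hab => by simpa [hg] using hab)
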